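-- pv_equiv track=rewrite | github.com/AryanK1511/DSA-for-coding-interviews | problems/01-arrays/others/002.py | func
-- ===== SOURCE A (Python) =====
-- def func(nums: list, target: int) -> bool:
--     left, right = 0, len(nums)
--
--     while left < right:
--         if left + right > target:
--             right -= 1
--         elif left + right < target:
--             left += 1
--         else:
--             return True
--
--     return False
-- ===== SOURCE B (Python) =====
-- def func(nums: list, target: int) -> bool:
--     # Closed form: the pointer walk's index sum starts at len(nums), moves by 1
--     # toward target, and can reach any value strictly between 0 and 2*len(nums).
--     return 0 < target < 2 * len(nums)
-- ===== Notes on version B (the rewrite author's own statement) =====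
-- stated objective: simpler
-- what changed: Replaced the two-pointer while-loop over (left, right) with the one-line closed-form test 0 < target < 2*len(nums), which characterises exactly when the index-sum walk hits target.
import Mathlib
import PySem

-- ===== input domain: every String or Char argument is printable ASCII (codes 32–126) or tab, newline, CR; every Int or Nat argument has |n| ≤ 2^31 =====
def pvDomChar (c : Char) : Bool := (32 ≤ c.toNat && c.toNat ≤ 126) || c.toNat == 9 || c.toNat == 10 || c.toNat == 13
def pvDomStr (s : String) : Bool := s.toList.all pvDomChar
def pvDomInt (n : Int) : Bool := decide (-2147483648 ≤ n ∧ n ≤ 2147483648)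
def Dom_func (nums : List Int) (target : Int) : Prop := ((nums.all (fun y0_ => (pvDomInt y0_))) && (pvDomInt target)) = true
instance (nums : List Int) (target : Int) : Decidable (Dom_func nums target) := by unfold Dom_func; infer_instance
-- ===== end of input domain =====

-- B replaces A's two-pointer index-sum walk by the closed-form test 0 < target < 2*len(nums).

-- ===== PORT A =====
-- literal port of A's while-loop over the state (left, right)
def funcLoop (left right target : Int) : Bool :=
  if _h : left < right then
    if left + right > target then funcLoop left (right - 1) target
    else if left + right < target then funcLoop (left + 1) right target
    else true
  else false
termination_by (right - left).toNat
decreasing_by all_goals omega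

def func (nums : List Int) (target : Int) : Bool :=
  funcLoop 0 (nums.length : Int) target

-- ===== PORT B =====
def func_alt (nums : List Int) (target : Int) : Bool :=
  decide (0 < target ∧ target < 2 * (nums.length : Int))

-- ===== PRECONDITION & SPEC =====
def Spec_func (nums : List Int) (target : Int) (out : Bool) : Prop := out = func_alt nums target
instance (nums : List Int) (target : Int) (out : Bool) : Decidable (Spec_func nums target out) := by unfold Spec_func; infer_instance

-- ===== CLAIM (what is proved, stated in full; the proofs are below) =====
def Claim_equal_func : Prop := ∀ (nums : List Int) (target : Int), Dom_func nums target → Spec_func nums target (func nums target)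

-- ===== LEMMAS AND PROOFS =====

-- Characterisation of A's loop: it returns true iff the sum can still reach
-- target, i.e. left < right ∧ 2*left < target ∧ target < 2*right.
theorem funcLoop_eq (l r t : Int) :
    funcLoop l r t = decide (l < r ∧ 2 * l < t ∧ t < 2 * r) := by
  rw [funcLoop]
  by_cases h : l < r
  · rw [dif_pos h]
    by_cases h1 : l + r > t
    · rw [if_pos h1, funcLoop_eq l (r - 1) t]
      simp only [decide_eq_decide]
      omega
    · by_cases h2 : l + r < t
      · rw [if_neg h1, if_pos h2, funcLoop_eq (l + 1) r t]
        simp only [decide_eq_decide]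
        omega
      · rw [if_neg h1, if_neg h2]
        exact (decide_eq_true (by omega)).symm
  · rw [dif_neg h]
    exact (decide_eq_false (by omega)).symm
termination_by (r - l).toNat
decreasing_by all_goals omega

-- ===== VERDICT (by name: the statement is the Claim_ definition above) =====
theorem func_spec : Claim_equal_func := by
  intro nums target _
  unfold Spec_func func func_alt
  rw [funcLoop_eq]
  simp only [decide_eq_decide]
  omega
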